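-- pv_equiv track=rewrite | github.com/m1chaelj/practicas-IA-2025 | ej-practico3/programa1/gato.py | hay_ganador
-- ===== SOURCE A (Python) =====
-- N = 4                # Tamaño del tablero (4x4)
--
-- def hay_ganador(tablero, jugador):
--     # Recibe: tablero que es una lista de listas (matriz N×N) con los símbolos 'X', 'O' o ' '.
--     # Recibe: jugador con su carácter, 'X' o 'O', que indica a quién le queremos verificar la victoria
--     # Recorre cada fila i
--     for i in range(N):
--         # ------- Comprueba por filas -------
--         # Supone al inicio (fila_gana = True) que toda la fila es del jugador.
--         fila_gana = True
--         # Recorre las columnas j de esa fila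
--         for j in range(N):
--             # Si encuentra una celda distinta, pone fila_gana = False y hace break
--             if tablero[i][j] != jugador:
--                 fila_gana = False
--                 break
--         if fila_gana:
--             return True
--
--         # ------- Comprueba por columnas -------
--         col_gana = True
--         for j in range(N):
--             if tablero[j][i] != jugador:
--                 col_gana = False
--                 break
--         if col_gana:
--             return True
--
--     '''
--     columnas→ 0    1    2    3
--     filas
--         0   (0,0)(0,1)(0,2)(0,3)
--         1   (1,0)(1,1)(1,2)(1,3)
--         2   (2,0)(2,1)(2,2)(2,3)
--         3   (3,0)(3,1)(3,2)(3,3)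
--
--         Diagonal principal: De esquina superior izquierda (0,0) hasta la esquina inferior derecha (3,3).
--                             En cada casilla, fila = columna → (i, i)
--         Diagonal secundaria: De esquina superior derecha (0,3) hasta la esquina inferior izquierda (3,0)
--     '''
--     # ------- Comprueba por diagonal (de arriba-izquierda a abajo-derecha): posiciones (0,0), (1,1), (2,2), (3,3) -------
--     diag1_gana = True
--     for i in range(N):
--         if tablero[i][i] != jugador:
--             diag1_gana = False
--             break
--     if diag1_gana:
--         return True
--
--     # ------- Comprueba por diagonal (de arriba-derecha a abajo-izquierda): posiciones (0,N-1), (1,N-2), (2,N-3), (3,0) -------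
--     diag2_gana = True
--     for i in range(N):
--         # La fila (i) va subiendo: 0, 1, 2, 3.
--         # La columna va bajando: 3, 2, 1, 0.
--         if tablero[i][N-1-i] != jugador: # La última columna siempre es N-1
--             diag2_gana = False
--             break
--     if diag2_gana:
--         return True
--     return False
-- ===== SOURCE B (Python) =====
-- N = 4                # Tamaño del tablero (4x4)
--
-- def hay_ganador(tablero, jugador):
--     # Single pass over all cells maintaining match counters per row, per column
--     # and for the two diagonals; the player wins iff some counter reaches N.
--     rows = [0] * N
--     cols = [0] * N
--     d1 = 0
--     d2 = 0
--     for i in range(N):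
--         for j in range(N):
--             if tablero[i][j] == jugador:
--                 rows[i] += 1
--                 cols[j] += 1
--                 if i == j:
--                     d1 += 1
--                 if i + j == N - 1:
--                     d2 += 1
--     return N in rows or N in cols or d1 == N or d2 == N
-- ===== Notes on version B (the rewrite author's own statement) =====
-- stated objective: alternative
-- what changed: B makes a single pass over all cells maintaining match counters per row, per column and for the two diagonals (the classic O(1)-per-cell counting technique) and wins iff some counter reaches N, instead of A's separate per-line scans with flag/break and early returns.
-- outside the precondition, e.g. on hay_ganador([['y', 'y', 'y', 'y'], ['y'], ['y'], ['y']], 'X'): A returns False, B raises IndexError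
import Mathlib
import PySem

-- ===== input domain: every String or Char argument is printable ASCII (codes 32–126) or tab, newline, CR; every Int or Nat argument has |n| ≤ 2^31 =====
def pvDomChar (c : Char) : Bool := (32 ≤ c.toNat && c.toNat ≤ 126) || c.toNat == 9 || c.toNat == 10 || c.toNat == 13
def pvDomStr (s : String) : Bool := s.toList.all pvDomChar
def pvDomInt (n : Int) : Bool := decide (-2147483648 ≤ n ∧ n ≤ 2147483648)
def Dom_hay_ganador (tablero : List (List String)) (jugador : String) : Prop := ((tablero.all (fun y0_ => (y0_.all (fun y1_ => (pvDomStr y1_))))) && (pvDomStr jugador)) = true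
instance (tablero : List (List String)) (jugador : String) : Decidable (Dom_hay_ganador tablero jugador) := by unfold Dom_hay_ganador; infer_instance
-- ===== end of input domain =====

-- B replaces A's per-line flag-and-break scans with a single pass over all cells
-- maintaining match counters per row/column/diagonal (alternative; same cost).

-- tablero[i][j]; exact on Pre_ (all indices hit a 4×4 board, so never out of range)
def pvCell (tablero : List (List String)) (i j : Int) : String :=
  PySem.List.pyGetD (PySem.List.pyGetD tablero i []) j ""

-- ===== PORT A =====
-- the outer 'for i in range(N)' with its two early returns; each inner
-- flag-and-break loop is the short-circuit '.all' over range(N)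
def pvLoopA (tablero : List (List String)) (jugador : String) : List Int → Bool
  | [] =>
    if (PySem.List.pyRange 0 4 1).all (fun i => pvCell tablero i i == jugador) then true
    else if (PySem.List.pyRange 0 4 1).all (fun i => pvCell tablero i (4 - 1 - i) == jugador) then true
    else false
  | i :: rest =>
    if (PySem.List.pyRange 0 4 1).all (fun j => pvCell tablero i j == jugador) then true
    else if (PySem.List.pyRange 0 4 1).all (fun j => pvCell tablero j i == jugador) then true
    else pvLoopA tablero jugador rest

def hay_ganador (tablero : List (List String)) (jugador : String) : Bool :=
  pvLoopA tablero jugador (PySem.List.pyRange 0 4 1)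

-- ===== PORT B =====
-- the body of the 'if tablero[i][j] == jugador' cell update; rows[i] += 1 is
-- List.modify at i.toNat (i, j ≥ 0 on every visited cell)
def pvStepB (tablero : List (List String)) (jugador : String)
    (st : List Int × List Int × Int × Int) (i j : Int) : List Int × List Int × Int × Int :=
  if pvCell tablero i j == jugador then
    (st.1.modify i.toNat (· + 1), st.2.1.modify j.toNat (· + 1),
     (if i == j then st.2.2.1 + 1 else st.2.2.1),
     (if i + j == 4 - 1 then st.2.2.2 + 1 else st.2.2.2))
  else st

def hay_ganador_alt (tablero : List (List String)) (jugador : String) : Bool :=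
  let fin := (PySem.List.pyRange 0 4 1).foldl
    (fun st i => (PySem.List.pyRange 0 4 1).foldl (fun st j => pvStepB tablero jugador st i j) st)
    ([0, 0, 0, 0], [0, 0, 0, 0], 0, 0)
  fin.1.contains 4 || fin.2.1.contains 4 || fin.2.2.1 == 4 || fin.2.2.2 == 4

-- ===== PRECONDITION & SPEC =====
-- Pre_ restricts to the natural domain (a board with at least 4 rows of at least
-- 4 cells, the only part either program inspects): outside it A's break order
-- decides which ragged boards raise IndexError and which happen to return.
def Pre_hay_ganador (tablero : List (List String)) (jugador : String) : Prop :=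
  4 ≤ tablero.length ∧ ∀ row ∈ tablero.take 4, 4 ≤ row.length
instance (tablero : List (List String)) (jugador : String) : Decidable (Pre_hay_ganador tablero jugador) := by unfold Pre_hay_ganador; infer_instance

def pvWitness_hay_ganador : List (List String) × String :=
  ([["X", "O", " ", " "], ["O", "X", " ", " "], [" ", " ", "X", "O"], ["O", " ", " ", "X"]], "X")

def Spec_hay_ganador (tablero : List (List String)) (jugador : String) (out : Bool) : Prop := out = hay_ganador_alt tablero jugador
instance (tablero : List (List String)) (jugador : String) (out : Bool) : Decidable (Spec_hay_ganador tablero jugador out) := by unfold Spec_hay_ganador; infer_instance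

-- ===== CLAIM (what is proved, stated in full; the proofs are below) =====
def Claim_equal_hay_ganador : Prop := ∀ (tablero : List (List String)) (jugador : String), Dom_hay_ganador tablero jugador → Pre_hay_ganador tablero jugador → Spec_hay_ganador tablero jugador (hay_ganador tablero jugador)

-- ===== LEMMAS AND PROOFS =====

theorem pvLen4 {α : Type} (l : List α) (h : 4 ≤ l.length) :
    ∃ a b c d t, l = a :: b :: c :: d :: t := by
  match l, h with
  | a :: b :: c :: d :: t, _ => exact ⟨a, b, c, d, t, rfl⟩

theorem modify_id {α : Type} : ∀ (l : List α) (i : Nat), l.modify i (fun x => x) = l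
  | [], _ => by simp
  | _ :: t, 0 => by simp
  | _ :: t, n+1 => by simp [modify_id t n]

theorem pvStepB_eq (t : List (List String)) (jug : String)
    (st : List Int × List Int × Int × Int) (i j : Int) :
    pvStepB t jug st i j =
      (st.1.modify i.toNat (· + cond (pvCell t i j == jug) 1 0),
       st.2.1.modify j.toNat (· + cond (pvCell t i j == jug) 1 0),
       st.2.2.1 + (if i == j then cond (pvCell t i j == jug) 1 0 else 0),
       st.2.2.2 + (if i + j == 4 - 1 then cond (pvCell t i j == jug) 1 0 else 0)) := by
  unfold pvStepB
  cases pvCell t i j == jug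
  · simp [modify_id]
  · simp only [cond_true, if_true, Prod.mk.injEq]
    refine ⟨trivial, trivial, ?_, ?_⟩ <;> split <;> simp

theorem pvMod0 (a b c d : Int) (f : Int → Int) : [a,b,c,d].modify ((0:Int).toNat) f = [f a,b,c,d] := rfl
theorem pvMod1 (a b c d : Int) (f : Int → Int) : [a,b,c,d].modify ((1:Int).toNat) f = [a,f b,c,d] := rfl
theorem pvMod2 (a b c d : Int) (f : Int → Int) : [a,b,c,d].modify ((2:Int).toNat) f = [a,b,f c,d] := rfl
theorem pvMod3 (a b c d : Int) (f : Int → Int) : [a,b,c,d].modify ((3:Int).toNat) f = [a,b,c,f d] := rfl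

theorem cnt4 (p q r s : Bool) :
    decide ((4:Int) = cond p 1 0 + cond q 1 0 + cond r 1 0 + cond s 1 0) = (p && q && r && s) := by
  cases p <;> cases q <;> cases r <;> cases s <;> decide

theorem cnt4' (p q r s : Bool) :
    ((cond p (1:Int) 0 + cond q 1 0 + cond r 1 0 + cond s 1 0) == 4) = (p && q && r && s) := by
  cases p <;> cases q <;> cases r <;> cases s <;> decide

-- ===== VERDICT (by name: the statement is the Claim_ definition above) =====
theorem hay_ganador_spec : Claim_equal_hay_ganador := by
  intro tablero jugador _ hpre
  obtain ⟨hlen, hrows⟩ := hpre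
  obtain ⟨r0, r1, r2, r3, rt, rfl⟩ := pvLen4 tablero hlen
  obtain ⟨a0, a1, a2, a3, at_, rfl⟩ := pvLen4 r0 (hrows _ (by simp))
  obtain ⟨b0, b1, b2, b3, bt, rfl⟩ := pvLen4 r1 (hrows _ (by simp))
  obtain ⟨c0, c1, c2, c3, ct, rfl⟩ := pvLen4 r2 (hrows _ (by simp))
  obtain ⟨d0, d1, d2, d3, dt, rfl⟩ := pvLen4 r3 (hrows _ (by simp))
  show hay_ganador _ _ = hay_ganador_alt _ _
  simp only [hay_ganador, hay_ganador_alt, pvLoopA, pvStepB_eq,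
    show PySem.List.pyRange 0 4 1 = [0, 1, 2, 3] from by decide,
    List.all_cons, List.all_nil, List.foldl_cons, List.foldl_nil,
    pvMod0, pvMod1, pvMod2, pvMod3]
  norm_num [pvCell, PySem.List.pyGetD_ofNat', cnt4, cnt4', List.contains_cons]
  simp only [show ∀ x y : String, (x == y) = decide (x = y) from fun _ _ => rfl]
  rw [Bool.eq_iff_iff]
  simp only [Bool.or_eq_true, Bool.and_eq_true, decide_eq_true_eq, or_assoc, and_assoc]
  constructor
  · rintro (h|h|h|h|h|h|h|h|h|h)
    · exact Or.inl h
    · exact Or.inr (Or.inr (Or.inr (Or.inr (Or.inl h))))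
    · exact Or.inr (Or.inl h)
    · exact Or.inr (Or.inr (Or.inr (Or.inr (Or.inr (Or.inl h)))))
    · exact Or.inr (Or.inr (Or.inl h))
    · exact Or.inr (Or.inr (Or.inr (Or.inr (Or.inr (Or.inr (Or.inl h))))))
    · exact Or.inr (Or.inr (Or.inr (Or.inl h)))
    · exact Or.inr (Or.inr (Or.inr (Or.inr (Or.inr (Or.inr (Or.inr (Or.inl h)))))))
    · exact Or.inr (Or.inr (Or.inr (Or.inr (Or.inr (Or.inr (Or.inr (Or.inr (Or.inl h))))))))
    · exact Or.inr (Or.inr (Or.inr (Or.inr (Or.inr (Or.inr (Or.inr (Or.inr (Or.inr (h)))))))))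
  · rintro (h|h|h|h|h|h|h|h|h|h)
    · exact Or.inl h
    · exact Or.inr (Or.inr (Or.inl h))
    · exact Or.inr (Or.inr (Or.inr (Or.inr (Or.inl h))))
    · exact Or.inr (Or.inr (Or.inr (Or.inr (Or.inr (Or.inr (Or.inl h))))))
    · exact Or.inr (Or.inl h)
    · exact Or.inr (Or.inr (Or.inr (Or.inl h)))
    · exact Or.inr (Or.inr (Or.inr (Or.inr (Or.inr (Or.inl h)))))
    · exact Or.inr (Or.inr (Or.inr (Or.inr (Or.inr (Or.inr (Or.inr (Or.inl h)))))))
    · exact Or.inr (Or.inr (Or.inr (Or.inr (Or.inr (Or.inr (Or.inr (Or.inr (Or.inl h))))))))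
    · exact Or.inr (Or.inr (Or.inr (Or.inr (Or.inr (Or.inr (Or.inr (Or.inr (Or.inr (h)))))))))
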